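-- pv_equiv track=rewrite | github.com/ProjectAlita/alita-sdk | alita_sdk/tools/figma/toon_tools.py | categorize_components
-- ===== SOURCE A (Python) =====
-- from typing import Callable, Dict, List, Optional, Tuple, Any
--
-- COMPONENT_CATEGORIES = {
--     'buttons': ['button', 'btn', 'cta', 'action', 'submit'],
--     'inputs': ['input', 'textfield', 'textarea', 'field', 'form'],
--     'selects': ['dropdown', 'select', 'picker', 'combo', 'menu'],
--     'toggles': ['toggle', 'switch', 'checkbox', 'radio'],
--     'cards': ['card', 'tile', 'item', 'cell'],
--     'navigation': ['nav', 'tab', 'menu', 'breadcrumb', 'link', 'header', 'footer', 'sidebar'],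
--     'icons': ['icon', 'ico', 'glyph', 'symbol'],
--     'images': ['image', 'img', 'photo', 'avatar', 'thumbnail', 'picture'],
--     'modals': ['modal', 'dialog', 'popup', 'overlay', 'sheet', 'drawer'],
--     'lists': ['list', 'table', 'grid', 'row', 'column'],
--     'badges': ['badge', 'tag', 'chip', 'label', 'pill'],
--     'progress': ['progress', 'spinner', 'loader', 'loading', 'skeleton'],
--     'alerts': ['alert', 'toast', 'notification', 'banner', 'snackbar'],
--     'dividers': ['divider', 'separator', 'line', 'hr'],
-- }
--
-- def categorize_components(components: List[str]) -> Dict[str, List[str]]: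
--     """
--     Group components into semantic categories.
--
--     Returns:
--         {
--             'buttons': ['Button/Primary', 'Button/Secondary'],
--             'inputs': ['Input/Text', 'Input/Email'],
--             'other': ['CustomComponent'],
--             ...
--         }
--     """
--     categorized = {cat: [] for cat in COMPONENT_CATEGORIES}
--     categorized['other'] = []
--
--     for component in components:
--         comp_lower = component.lower()
--         found_category = False
--
--         for category, keywords in COMPONENT_CATEGORIES.items():
--             if any(kw in comp_lower for kw in keywords):
--                 categorized[category].append(component)
--                 found_category = True
--                 break
--
--         if not found_category:
--             categorized['other'].append(component)
--
--     # Remove empty categories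
--     return {k: v for k, v in categorized.items() if v}
-- ===== SOURCE B (Python) =====
-- from typing import Dict, List
--
-- COMPONENT_CATEGORIES = {
--     'buttons': ['button', 'btn', 'cta', 'action', 'submit'],
--     'inputs': ['input', 'textfield', 'textarea', 'field', 'form'],
--     'selects': ['dropdown', 'select', 'picker', 'combo', 'menu'],
--     'toggles': ['toggle', 'switch', 'checkbox', 'radio'],
--     'cards': ['card', 'tile', 'item', 'cell'],
--     'navigation': ['nav', 'tab', 'menu', 'breadcrumb', 'link', 'header', 'footer', 'sidebar'],
--     'icons': ['icon', 'ico', 'glyph', 'symbol'],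
--     'images': ['image', 'img', 'photo', 'avatar', 'thumbnail', 'picture'],
--     'modals': ['modal', 'dialog', 'popup', 'overlay', 'sheet', 'drawer'],
--     'lists': ['list', 'table', 'grid', 'row', 'column'],
--     'badges': ['badge', 'tag', 'chip', 'label', 'pill'],
--     'progress': ['progress', 'spinner', 'loader', 'loading', 'skeleton'],
--     'alerts': ['alert', 'toast', 'notification', 'banner', 'snackbar'],
--     'dividers': ['divider', 'separator', 'line', 'hr'],
-- }
--
-- def categorize_components(components: List[str]) -> Dict[str, List[str]]:
--     """Invert the nesting: drain a pool of still-unassigned components category by category."""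
--     buckets = []
--     remaining = list(components)
--     for category, keywords in COMPONENT_CATEGORIES.items():
--         matched = []
--         still = []
--         for comp in remaining:
--             comp_lower = comp.lower()
--             if any(kw in comp_lower for kw in keywords):
--                 matched.append(comp)
--             else:
--                 still.append(comp)
--         buckets.append((category, matched))
--         remaining = still
--     buckets.append(('other', remaining))
--     return {k: v for k, v in buckets if v}
-- ===== Notes on version B (the rewrite author's own statement) =====
-- stated objective: alternative
-- what changed: Inverts the loop nesting: instead of per-component first-match scan over categories appended into a pre-keyed dict, B iterates over the categories once, draining a maintained pool of still-unassigned components into per-category buckets, with the leftover pool becoming 'other'.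
import Mathlib
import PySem

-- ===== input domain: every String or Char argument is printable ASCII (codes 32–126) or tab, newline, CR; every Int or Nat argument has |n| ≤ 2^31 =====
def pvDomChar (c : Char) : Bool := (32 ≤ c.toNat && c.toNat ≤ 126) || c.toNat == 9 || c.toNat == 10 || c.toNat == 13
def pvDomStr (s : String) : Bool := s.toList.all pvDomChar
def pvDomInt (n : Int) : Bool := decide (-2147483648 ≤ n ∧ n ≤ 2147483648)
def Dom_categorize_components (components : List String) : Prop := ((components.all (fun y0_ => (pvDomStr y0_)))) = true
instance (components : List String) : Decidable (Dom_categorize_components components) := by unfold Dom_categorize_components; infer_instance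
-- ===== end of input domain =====

-- B inverts the loop nesting (drains a pool of unassigned components category by category); objective: alternative decomposition, same cost.


-- ===== PORT A =====
-- module constant COMPONENT_CATEGORIES (a dict: association list in insertion order)
def COMPONENT_CATEGORIES : List (String × List String) :=
  [("buttons", ["button", "btn", "cta", "action", "submit"]),
   ("inputs", ["input", "textfield", "textarea", "field", "form"]),
   ("selects", ["dropdown", "select", "picker", "combo", "menu"]),
   ("toggles", ["toggle", "switch", "checkbox", "radio"]),
   ("cards", ["card", "tile", "item", "cell"]),
   ("navigation", ["nav", "tab", "menu", "breadcrumb", "link", "header", "footer", "sidebar"]),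
   ("icons", ["icon", "ico", "glyph", "symbol"]),
   ("images", ["image", "img", "photo", "avatar", "thumbnail", "picture"]),
   ("modals", ["modal", "dialog", "popup", "overlay", "sheet", "drawer"]),
   ("lists", ["list", "table", "grid", "row", "column"]),
   ("badges", ["badge", "tag", "chip", "label", "pill"]),
   ("progress", ["progress", "spinner", "loader", "loading", "skeleton"]),
   ("alerts", ["alert", "toast", "notification", "banner", "snackbar"]),
   ("dividers", ["divider", "separator", "line", "hr"])]

-- A's inner 'for category, keywords in …: if any(kw in comp_lower …): …; break' as a first-match scan
def pyFindCategory (comp_lower : String) : List (String × List String) → Option String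
  | [] => none
  | (category, keywords) :: rest =>
      if keywords.any (fun kw => PySem.Str.isIn kw comp_lower) then some category
      else pyFindCategory comp_lower rest

def categorize_components (components : List String) : List (String × List String) :=
  -- categorized = {cat: [] for cat in COMPONENT_CATEGORIES}; categorized['other'] = []
  let init : PySem.Dict String (List String) :=
    ((COMPONENT_CATEGORIES.map Prod.fst).foldl
      (fun d cat => d.insert cat ([] : List String)) PySem.Dict.empty).insert "other" []
  let final : PySem.Dict String (List String) :=
    components.foldl (fun categorized component =>
      let comp_lower := PySem.Str.lower component
      match pyFindCategory comp_lower COMPONENT_CATEGORIES with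
      | some category => categorized.modify category [] (fun v => v ++ [component])
      | none => categorized.modify "other" [] (fun v => v ++ [component])) init
  final.items.filter (fun kv => !kv.2.isEmpty)

-- ===== PORT B =====
def matchesAny (keywords : List String) (comp : String) : Bool :=
  keywords.any (fun kw => PySem.Str.isIn kw (PySem.Str.lower comp))

def categorize_components_alt (components : List String) : List (String × List String) :=
  let st : List (String × List String) × List String :=
    COMPONENT_CATEGORIES.foldl (fun st ckw =>
      let matched := st.2.filter (fun comp => matchesAny ckw.2 comp)
      let still := st.2.filter (fun comp => !matchesAny ckw.2 comp)
      (st.1 ++ [(ckw.1, matched)], still)) ([], components)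
  (st.1 ++ [("other", st.2)]).filter (fun kv => !kv.2.isEmpty)

-- ===== PRECONDITION & SPEC =====
def Spec_categorize_components (components : List String) (out : List (String × List String)) : Prop := out = categorize_components_alt components
instance (components : List String) (out : List (String × List String)) : Decidable (Spec_categorize_components components out) := by unfold Spec_categorize_components; infer_instance

-- ===== CLAIM (what is proved, stated in full; the proofs are below) =====
def Claim_equal_categorize_components : Prop := ∀ (components : List String), Dom_categorize_components components → Spec_categorize_components components (categorize_components components)

-- ===== LEMMAS AND PROOFS =====

-- the category A's per-component scan assigns, relative to a category list L
def assignL (L : List (String × List String)) (comp : String) : String :=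
  match pyFindCategory (PySem.Str.lower comp) L with
  | some c => c
  | none => "other"

-- B's two accumulators, described recursively
def bucketsOf : List (String × List String) → List String → List (String × List String)
  | [], _ => []
  | ckw :: t, rem =>
      (ckw.1, rem.filter (fun comp => matchesAny ckw.2 comp)) ::
        bucketsOf t (rem.filter (fun comp => !matchesAny ckw.2 comp))

def leftoverOf : List (String × List String) → List String → List String
  | [], rem => rem
  | ckw :: t, rem => leftoverOf t (rem.filter (fun comp => !matchesAny ckw.2 comp))

lemma pyFindCategory_cons (c : String) (kws : List String) (t : List (String × List String)) (cl : String) :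
    pyFindCategory cl ((c, kws) :: t)
      = if kws.any (fun kw => PySem.Str.isIn kw cl) then some c else pyFindCategory cl t := rfl

lemma assignL_cons (c : String) (kws : List String) (t : List (String × List String)) (comp : String) :
    assignL ((c, kws) :: t) comp = if matchesAny kws comp then c else assignL t comp := by
  unfold assignL
  rw [pyFindCategory_cons]
  by_cases hb : matchesAny kws comp = true
  · rw [if_pos (by simpa [matchesAny] using hb), if_pos hb]
  · rw [if_neg (by simpa [matchesAny] using hb), if_neg hb]

lemma assignL_mem (L : List (String × List String)) (comp : String) :
    assignL L comp ∈ L.map Prod.fst ++ ["other"] := by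
  induction L with
  | nil => simp [assignL, pyFindCategory]
  | cons h t ih =>
      obtain ⟨c, kws⟩ := h
      rw [assignL_cons]
      by_cases hb : matchesAny kws comp = true
      · simp [hb]
      · rw [if_neg (by simp [hb])]
        simp only [List.map_cons, List.cons_append]
        exact List.mem_cons_of_mem _ ih

-- Dict.modify on a dict of shape ⟨Ks.map (k, v k)⟩ with c ∈ Ks rewrites exactly the c-entries
lemma dict_get?_mapped (Ks : List String) (v : String → List String) (c : String) (hc : c ∈ Ks) :
    (PySem.Dict.mk (Ks.map fun k => (k, v k))).get? c = some (v c) := by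
  induction Ks with
  | nil => simp at hc
  | cons k t ih =>
      by_cases hk : k = c
      · subst hk; simp [PySem.Dict.get?]
      · have hct : c ∈ t := by
          rcases List.mem_cons.mp hc with h | h
          · exact absurd h.symm hk
          · exact h
        have := ih hct
        simpa [PySem.Dict.get?, hk, Ne.symm hk] using this

lemma dict_contains_mapped (Ks : List String) (v : String → List String) (c : String) (hc : c ∈ Ks) :
    (PySem.Dict.mk (Ks.map fun k => (k, v k))).contains c = true := by
  rw [PySem.Dict.contains_eq_isSome_get?, dict_get?_mapped Ks v c hc]
  rfl

lemma dict_modify_mapped (Ks : List String) (v : String → List String) (c : String) (hc : c ∈ Ks)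
    (comp : String) :
    (PySem.Dict.mk (Ks.map fun k => (k, v k))).modify c [] (fun w => w ++ [comp])
      = PySem.Dict.mk (Ks.map fun k => (k, if k = c then v k ++ [comp] else v k)) := by
  have hg : (PySem.Dict.mk (Ks.map fun k => (k, v k))).getD c [] = v c := by
    simp [PySem.Dict.getD, dict_get?_mapped Ks v c hc]
  simp only [PySem.Dict.modify, hg, PySem.Dict.insert, dict_contains_mapped Ks v c hc, if_pos]
  rw [PySem.Dict.mk.injEq]
  simp only [List.map_map]
  apply List.map_congr_left
  intro k _
  by_cases hk : k = c
  · subst hk; simp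
  · simp [hk]

-- invariant of A's component loop over a dict of mapped shape
lemma A_fold_inv (Ks : List String) (comps : List String) (v : String → List String)
    (hK : ∀ comp, assignL COMPONENT_CATEGORIES comp ∈ Ks) :
    comps.foldl (fun categorized component =>
        match pyFindCategory (PySem.Str.lower component) COMPONENT_CATEGORIES with
        | some category => categorized.modify category [] (fun w => w ++ [component])
        | none => categorized.modify "other" [] (fun w => w ++ [component]))
      (PySem.Dict.mk (Ks.map fun k => (k, v k)))
    = PySem.Dict.mk (Ks.map fun k =>
        (k, v k ++ comps.filter (fun comp => assignL COMPONENT_CATEGORIES comp == k))) := by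
  induction comps generalizing v with
  | nil => simp
  | cons comp rest ih =>
      have hstep : (match pyFindCategory (PySem.Str.lower comp) COMPONENT_CATEGORIES with
          | some category => (PySem.Dict.mk (Ks.map fun k => (k, v k))).modify category [] (fun w => w ++ [comp])
          | none => (PySem.Dict.mk (Ks.map fun k => (k, v k))).modify "other" [] (fun w => w ++ [comp]))
          = (PySem.Dict.mk (Ks.map fun k => (k, v k))).modify (assignL COMPONENT_CATEGORIES comp) [] (fun w => w ++ [comp]) := by
        unfold assignL
        cases pyFindCategory (PySem.Str.lower comp) COMPONENT_CATEGORIES <;> rfl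
      rw [List.foldl_cons, hstep,
        dict_modify_mapped Ks v (assignL COMPONENT_CATEGORIES comp) (hK comp) comp,
        ih (fun k => if k = assignL COMPONENT_CATEGORIES comp then v k ++ [comp] else v k)]
      rw [PySem.Dict.mk.injEq]
      apply List.map_congr_left
      intro k _
      by_cases hk : assignL COMPONENT_CATEGORIES comp = k
      · simp [hk]
      · have : ¬ k = assignL COMPONENT_CATEGORIES comp := fun h => hk h.symm
        simp [hk, this]

-- invariant of B's category loop
lemma B_fold_inv (L : List (String × List String)) (acc : List (String × List String)) (rem : List String) :
    L.foldl (fun st ckw =>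
        (st.1 ++ [(ckw.1, st.2.filter (fun comp => matchesAny ckw.2 comp))],
         st.2.filter (fun comp => !matchesAny ckw.2 comp))) (acc, rem)
    = (acc ++ bucketsOf L rem, leftoverOf L rem) := by
  induction L generalizing acc rem with
  | nil => simp [bucketsOf, leftoverOf]
  | cons ckw t ih =>
      simp only [List.foldl_cons, ih, bucketsOf, leftoverOf, List.append_assoc, List.singleton_append]

-- the A-shaped bucket table over L equals B's drained buckets, given distinct names
lemma main_lemma : ∀ (L : List (String × List String)) (rem : List String),
    (L.map Prod.fst ++ ["other"]).Nodup →
    (L.map Prod.fst ++ ["other"]).map (fun k => (k, rem.filter (fun comp => assignL L comp == k)))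
      = bucketsOf L rem ++ [("other", leftoverOf L rem)] := by
  intro L
  induction L with
  | nil =>
      intro rem _
      simp [bucketsOf, leftoverOf, assignL, pyFindCategory]
  | cons h t ih =>
      intro rem hnd
      obtain ⟨c, kws⟩ := h
      have hnd2 := hnd
      simp only [List.map_cons, List.cons_append, List.nodup_cons] at hnd2
      obtain ⟨hcnot, hnd'⟩ := hnd2
      simp only [List.map_cons, List.cons_append, List.map, bucketsOf, leftoverOf]
      congr 1
      · -- head bucket
        congr 1
        apply List.filter_congr
        intro comp _
        rw [assignL_cons]
        by_cases hm : matchesAny kws comp = true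
        · simp [hm]
        · simp only [Bool.not_eq_true] at hm
          rw [if_neg (by simp [hm])]
          have hne : assignL t comp ≠ c := by
            intro he
            exact hcnot (he ▸ assignL_mem t comp)
          simp [hne, hm]
      · -- tail buckets over the drained pool
        rw [← ih (rem.filter (fun comp => !matchesAny kws comp)) hnd']
        apply List.map_congr_left
        intro k hk
        have hkc : k ≠ c := fun he => hcnot (he ▸ hk)
        congr 1
        rw [List.filter_filter]
        apply List.filter_congr
        intro comp _
        rw [assignL_cons]
        by_cases hm : matchesAny kws comp = true
        · simp [hm, Ne.symm hkc]
        · simp only [Bool.not_eq_true] at hm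
          simp [hm]

-- ===== VERDICT (by name: the statement is the Claim_ definition above) =====
theorem categorize_components_spec : Claim_equal_categorize_components := by
  intro components _
  unfold Spec_categorize_components
  have hnd : (COMPONENT_CATEGORIES.map Prod.fst ++ ["other"]).Nodup := by decide
  have hinit : (((COMPONENT_CATEGORIES.map Prod.fst).foldl
      (fun d cat => d.insert cat ([] : List String)) PySem.Dict.empty).insert "other" [])
      = PySem.Dict.mk ((COMPONENT_CATEGORIES.map Prod.fst ++ ["other"]).map
          (fun k => (k, ([] : List String)))) := by decide
  have hK : ∀ comp, assignL COMPONENT_CATEGORIES comp ∈ COMPONENT_CATEGORIES.map Prod.fst ++ ["other"] :=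
    fun comp => assignL_mem COMPONENT_CATEGORIES comp
  have hA : components.foldl (fun categorized component =>
        match pyFindCategory (PySem.Str.lower component) COMPONENT_CATEGORIES with
        | some category => categorized.modify category [] (fun v => v ++ [component])
        | none => categorized.modify "other" [] (fun v => v ++ [component]))
      (PySem.Dict.mk ((COMPONENT_CATEGORIES.map Prod.fst ++ ["other"]).map
          (fun k => (k, ([] : List String)))))
      = PySem.Dict.mk ((COMPONENT_CATEGORIES.map Prod.fst ++ ["other"]).map fun k =>
          (k, components.filter (fun comp => assignL COMPONENT_CATEGORIES comp == k))) := by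
    have := A_fold_inv (COMPONENT_CATEGORIES.map Prod.fst ++ ["other"]) components
        (fun _ => ([] : List String)) hK
    simpa using this
  have hAeq : categorize_components components
      = ((COMPONENT_CATEGORIES.map Prod.fst ++ ["other"]).map (fun k =>
          (k, components.filter (fun comp => assignL COMPONENT_CATEGORIES comp == k)))).filter
          (fun kv => !kv.2.isEmpty) := by
    simp only [categorize_components]
    rw [hinit, hA]
  have hBeq : categorize_components_alt components
      = (bucketsOf COMPONENT_CATEGORIES components
          ++ [("other", leftoverOf COMPONENT_CATEGORIES components)]).filter
          (fun kv => !kv.2.isEmpty) := by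
    simp only [categorize_components_alt]
    rw [B_fold_inv COMPONENT_CATEGORIES [] components]
    simp
  rw [hAeq, hBeq, main_lemma COMPONENT_CATEGORIES components hnd]
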